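-- pv_equiv track=rewrite | github.com/ilitzkyd/Matrix-generator | Assignment7_dmi293.py | square_mat
-- ===== SOURCE A (Python) =====
-- def square_mat(mat):
--     columns = len(mat[0])
--     num_rows = len(mat)
--     first = []
--     for i in range(columns):
--         inc = 0
--         for r in range(num_rows):
--             if mat[r][i] == 1:
--                 inc += 1
--         if inc % 2 == 0:
--             first.append(i)
--     return first
-- ===== SOURCE B (Python) =====
-- def square_mat(mat):
--     columns = len(mat[0])
--     mask = 0
--     for row in mat:
--         m = 0
--         for i in range(columns):
--             if row[i] == 1:
--                 m |= 1 << i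
--         mask ^= m
--     return [i for i in range(columns) if not (mask >> i) & 1]
-- ===== Notes on version B (the rewrite author's own statement) =====
-- stated objective: alternative
-- what changed: B replaces per-column counting with modulo by parity algebra on a single integer bitmask: each row is encoded as a bitmask of its 1-cells and XOR-folded into one accumulator, so a column has an even number of 1s iff its bit in the final mask is clear; no counts or mod are computed.
import Mathlib
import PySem

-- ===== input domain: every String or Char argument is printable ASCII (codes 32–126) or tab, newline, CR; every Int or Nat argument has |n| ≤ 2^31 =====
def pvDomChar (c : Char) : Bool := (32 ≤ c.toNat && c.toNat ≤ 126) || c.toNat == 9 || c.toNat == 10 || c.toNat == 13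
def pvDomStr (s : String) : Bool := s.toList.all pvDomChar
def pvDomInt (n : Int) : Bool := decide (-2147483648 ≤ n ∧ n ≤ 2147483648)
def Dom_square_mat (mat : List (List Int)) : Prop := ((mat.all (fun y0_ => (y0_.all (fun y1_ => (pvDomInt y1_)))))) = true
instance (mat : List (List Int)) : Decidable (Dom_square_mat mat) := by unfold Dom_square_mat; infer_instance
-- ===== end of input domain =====

-- B replaces A's per-column count-and-mod with XOR parity algebra on a single integer
-- bitmask (each row XOR-folded as a bitmask of its 1-cells); objective: alternative.


-- ===== PORT A =====
-- mat[0] on empty mat and mat[r][i] on too-short rows raise in Python; Pre_ excludes those,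
-- so the defaults (headD [], pyGetD … 0) are never reached under the claim.
def square_mat (mat : List (List Int)) : List Int :=
  let columns : Int := ((mat.headD []).length : Int)
  let numRows : Int := (mat.length : Int)
  (PySem.List.pyRange 0 columns 1).foldl (fun first i =>
    let inc : Int := (PySem.List.pyRange 0 numRows 1).foldl
      (fun inc r => if PySem.List.pyGetD (PySem.List.pyGetD mat r []) i 0 = 1 then inc + 1 else inc) 0
    if inc % 2 == 0 then first ++ [i] else first) []

-- ===== PORT B =====
-- Python's mask and m are built only from |, ^ and 1 << i with i ≥ 0, hence are
-- nonnegative ints; they are ported as Nat so Lean's bitwise ops match Python's exactly.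
def square_mat_alt (mat : List (List Int)) : List Int :=
  let columns : Int := ((mat.headD []).length : Int)
  let mask : Nat := mat.foldl
    (fun (mask : Nat) (row : List Int) =>
      mask ^^^ (PySem.List.pyRange 0 columns 1).foldl
        (fun m i => if PySem.List.pyGetD row i 0 = 1 then m ||| (1 <<< i.toNat) else m) 0) 0
  (PySem.List.pyRange 0 columns 1).filter (fun i => !(mask.testBit i.toNat))

-- ===== PRECONDITION & SPEC =====
-- Pre_ excludes exactly the inputs where Python A raises IndexError: empty mat (mat[0])
-- and rows shorter than the first row (mat[r][i]).
def Pre_square_mat (mat : List (List Int)) : Prop :=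
  mat ≠ [] ∧ ∀ row ∈ mat, (mat.headD []).length ≤ row.length
instance (mat : List (List Int)) : Decidable (Pre_square_mat mat) := by unfold Pre_square_mat; infer_instance
def pvWitness_square_mat : List (List Int) := [[1, 2], [1, 0]]
def Spec_square_mat (mat : List (List Int)) (out : List Int) : Prop := out = square_mat_alt mat
instance (mat : List (List Int)) (out : List Int) : Decidable (Spec_square_mat mat out) := by unfold Spec_square_mat; infer_instance

-- ===== CLAIM (what is proved, stated in full; the proofs are below) =====
def Claim_equal_square_mat : Prop := ∀ (mat : List (List Int)), Dom_square_mat mat → Pre_square_mat mat → Spec_square_mat mat (square_mat mat)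

-- ===== LEMMAS AND PROOFS =====

-- B's per-row bitmask, in Nat-index form
def rowMask (n : Nat) (row : List Int) : Nat :=
  (List.range n).foldl (fun m j => if row.getD j 0 = 1 then m ||| (1 <<< j) else m) 0

theorem bitfold_testBit (row : List Int) (l : List Nat) (acc k : Nat) :
    (l.foldl (fun m j => if row.getD j 0 = 1 then m ||| (1 <<< j) else m) acc).testBit k
      = (acc.testBit k || (decide (k ∈ l) && decide (row.getD k 0 = 1))) := by
  induction l generalizing acc with
  | nil => simp
  | cons j t ih =>
    rw [List.foldl_cons, ih]
    by_cases hp : row.getD j 0 = 1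
    · have hp' : row[j]?.getD 0 = 1 := by
        rw [← List.getD_eq_getElem?_getD]; exact hp
      rw [if_pos hp]
      by_cases hjk : j = k
      · subst hjk
        simp [hp', Nat.testBit_or, Nat.one_shiftLeft]
      · simp [Nat.testBit_or, Nat.one_shiftLeft, hjk, Ne.symm hjk]
    · have hp' : ¬ (row[j]?.getD 0 = 1) := by
        rw [← List.getD_eq_getElem?_getD]; exact hp
      rw [if_neg hp]
      by_cases hjk : j = k
      · subst hjk
        simp [hp']
      · simp [Ne.symm hjk]

theorem rowMask_testBit (n : Nat) (row : List Int) (k : Nat) (hk : k < n) :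
    (rowMask n row).testBit k = decide (row.getD k 0 = 1) := by
  unfold rowMask
  rw [bitfold_testBit]
  simp [List.mem_range, hk]

theorem mask_testBit (n : Nat) (rows : List (List Int)) (acc k : Nat) (hk : k < n) :
    (rows.foldl (fun mask row => mask ^^^ rowMask n row) acc).testBit k
      = ((acc.testBit k).xor (decide (rows.countP (fun row => row.getD k 0 == 1) % 2 = 1))) := by
  induction rows generalizing acc with
  | nil => simp
  | cons row t ih =>
    rw [List.foldl_cons, ih, Nat.testBit_xor, rowMask_testBit n row k hk, List.countP_cons]
    by_cases hp : row.getD k 0 = 1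
    · have h2 : ∀ c : Nat, decide ((c + 1) % 2 = 1) = !decide (c % 2 = 1) := by
        intro c
        rcases Nat.mod_two_eq_zero_or_one c with h | h <;>
          simp [Nat.add_mod, h]
      simp only [hp, beq_self_eq_true, if_true, decide_true, h2]
      cases acc.testBit k <;>
        cases (decide (t.countP (fun row => row.getD k 0 == 1) % 2 = 1)) <;> simp
    · have h1 : (row.getD k 0 == 1) = false := beq_eq_false_iff_ne.mpr hp
      have h2 : decide (row.getD k 0 = 1) = false := decide_eq_false hp
      rw [h1, h2]
      simp only [Bool.false_eq_true, if_false, Nat.add_zero]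
      cases acc.testBit k <;> simp

-- A's inner counting loop is a countP
theorem foldl_count_eq_countP (rows : List (List Int)) (k : Nat) (z : Int) :
    rows.foldl (fun inc row => if row.getD k 0 = 1 then inc + 1 else inc) z =
      z + (rows.countP (fun row => row.getD k 0 == 1) : Int) := by
  induction rows generalizing z with
  | nil => simp
  | cons row t ih =>
    rw [List.foldl_cons, List.countP_cons]
    by_cases h : row.getD k 0 = 1
    · rw [if_pos h, if_pos (beq_iff_eq.mpr h), ih]
      push_cast; ring
    · rw [if_neg h, if_neg (fun hb => h (beq_iff_eq.mp hb)), ih]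
      push_cast; ring

-- ===== VERDICT (by name: the statement is the Claim_ definition above) =====
theorem square_mat_spec : Claim_equal_square_mat := by
  intro mat _ _
  unfold Spec_square_mat square_mat square_mat_alt
  simp only []
  set n : Nat := (mat.headD []).length with hn
  -- B's row-mask fold in Nat form
  have hfun : (fun (mask : Nat) (row : List Int) =>
      mask ^^^ (PySem.List.pyRange 0 ((n : Nat) : Int) 1).foldl
        (fun m i => if PySem.List.pyGetD row i 0 = 1 then m ||| (1 <<< i.toNat) else m) 0) =
      (fun mask row => mask ^^^ rowMask n row) := by
    funext mask row
    unfold rowMask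
    rw [PySem.List.pyRange_zero_nat, List.foldl_map]
    congr 1
    apply PySem.List.foldl_congr_mem
    intro acc k _
    simp
  rw [hfun, PySem.List.foldl_append_if_eq_filter, List.nil_append]
  apply List.filter_congr
  intro i hi
  obtain ⟨hi0, hin⟩ := (PySem.List.mem_pyRange_one).mp hi
  obtain ⟨k, rfl⟩ : ∃ k : Nat, i = (k : Int) := ⟨i.toNat, (Int.toNat_of_nonneg hi0).symm⟩
  have hk : k < n := by exact_mod_cast hin
  -- A's inner counting loop
  have hA : (PySem.List.pyRange 0 ((mat.length : Nat) : Int) 1).foldl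
      (fun inc r => if PySem.List.pyGetD (PySem.List.pyGetD mat r []) (k : Int) 0 = 1
        then inc + 1 else inc) (0 : Int) =
      (mat.countP (fun row => row.getD k 0 == 1) : Int) := by
    rw [PySem.List.pyRange_zero_nat, List.foldl_map]
    have h1 : (List.range mat.length).foldl
        (fun (inc : Int) (r : Nat) => if PySem.List.pyGetD (PySem.List.pyGetD mat (r : Int) []) (k : Int) 0 = 1
          then inc + 1 else inc) (0 : Int) =
        (List.range mat.length).foldl
        (fun inc r => if (mat.getD r []).getD k 0 = 1 then inc + 1 else inc) (0 : Int) := by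
      apply PySem.List.foldl_congr_mem
      intro acc r _
      simp
    rw [h1]
    have h2 := List.foldl_map (f := fun r => mat.getD r [])
      (g := fun (inc : Int) row => if row.getD k 0 = 1 then inc + 1 else inc)
      (l := List.range mat.length) (init := (0 : Int))
    rw [← h2]
    have h3 : (List.range mat.length).map (fun r => mat.getD r []) = mat := by
      apply List.ext_getElem (by simp)
      intro j hj1 hj2
      simp [List.getD, List.getElem?_eq_getElem (by simpa using hj2)]
    rw [h3, foldl_count_eq_countP]
    simp
  rw [hA, Int.toNat_natCast, mask_testBit n mat 0 k hk]
  set c : Nat := mat.countP (fun row => row.getD k 0 == 1) with hc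
  have hmod : ((c : Int) % 2 == 0) = !decide (c % 2 = 1) := by
    rcases Nat.mod_two_eq_zero_or_one c with h | h
    · have h' : (c : Int) % 2 = 0 := by omega
      simp [h', h]
    · have h' : (c : Int) % 2 = 1 := by omega
      simp [h', h]
  rw [hmod]
  simp [Nat.zero_testBit]
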